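-- pv_equiv track=rewrite | github.com/mathsamillion/Symmetric_Group_Composition_Creator | Symmetric_Group.py | cycles_disjoint_check
-- ===== SOURCE A (Python) =====
-- def cycles_disjoint_check(cycles_list):
--     disjoint_test = 1
--     elements_found = []
--     for cycle in cycles_list:
--         for element in cycle:
--             if element in elements_found:
--                 disjoint_test = 0
--                 return disjoint_test
--             elements_found.append(element)
--     return disjoint_test
-- ===== SOURCE B (Python) =====
-- def cycles_disjoint_check(cycles_list):
--     flat = [element for cycle in cycles_list for element in cycle]
--     return 1 if len(flat) == len(set(flat)) else 0
-- ===== Notes on version B (the rewrite author's own statement) =====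
-- stated objective: simpler
-- what changed: Replaces the stateful seen-list with per-element linear membership scans and an early return by a two-phase collect-then-compare: flatten all cycles once and compare the flat list's length with its set's cardinality.
import Mathlib
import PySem

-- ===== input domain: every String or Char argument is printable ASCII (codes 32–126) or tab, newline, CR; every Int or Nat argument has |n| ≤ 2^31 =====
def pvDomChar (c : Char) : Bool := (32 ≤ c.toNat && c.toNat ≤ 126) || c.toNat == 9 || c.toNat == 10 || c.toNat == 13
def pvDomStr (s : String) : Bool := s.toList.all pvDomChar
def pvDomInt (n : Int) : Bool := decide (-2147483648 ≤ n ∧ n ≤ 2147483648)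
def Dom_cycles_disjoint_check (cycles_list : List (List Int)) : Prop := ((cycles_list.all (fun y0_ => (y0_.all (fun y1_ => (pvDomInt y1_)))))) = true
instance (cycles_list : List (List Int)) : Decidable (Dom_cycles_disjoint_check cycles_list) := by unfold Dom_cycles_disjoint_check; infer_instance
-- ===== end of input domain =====

-- B replaces A's running seen-list with early return by flatten-once then compare list length with set cardinality (simpler).


-- ===== PORT A =====
-- inner 'for element in cycle' loop; none = the early 'return 0', some seen' = loop finished
def pvInnerA (seen : List Int) : List Int → Option (List Int)
  | [] => some seen
  | e :: rest => if seen.contains e then none else pvInnerA (seen ++ [e]) rest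

-- outer 'for cycle in cycles_list' loop
def pvOuterA (seen : List Int) : List (List Int) → Int
  | [] => 1
  | c :: rest =>
    match pvInnerA seen c with
    | none => 0
    | some seen' => pvOuterA seen' rest

def cycles_disjoint_check (cycles_list : List (List Int)) : Int :=
  pvOuterA [] cycles_list

-- ===== PORT B =====
def cycles_disjoint_check_alt (cycles_list : List (List Int)) : Int :=
  let flat := cycles_list.flatMap (fun cycle => cycle)
  if flat.length = (PySem.Set.ofList flat).length then 1 else 0

-- ===== PRECONDITION & SPEC =====
def Spec_cycles_disjoint_check (cycles_list : List (List Int)) (out : Int) : Prop := out = cycles_disjoint_check_alt cycles_list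
instance (cycles_list : List (List Int)) (out : Int) : Decidable (Spec_cycles_disjoint_check cycles_list out) := by unfold Spec_cycles_disjoint_check; infer_instance

-- ===== CLAIM (what is proved, stated in full; the proofs are below) =====
def Claim_equal_cycles_disjoint_check : Prop := ∀ (cycles_list : List (List Int)), Dom_cycles_disjoint_check cycles_list → Spec_cycles_disjoint_check cycles_list (cycles_disjoint_check cycles_list)

-- ===== LEMMAS AND PROOFS =====

theorem pvInnerA_eq (c : List Int) (seen : List Int) (h : seen.Nodup) :
    pvInnerA seen c = if (seen ++ c).Nodup then some (seen ++ c) else none := by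
  induction c generalizing seen with
  | nil => simp [pvInnerA, h]
  | cons e rest ih =>
    by_cases he : seen.contains e
    · have hmem : e ∈ seen := by simp at he; exact he
      have hno : ¬ (seen ++ e :: rest).Nodup := by
        intro hn
        exact (List.disjoint_of_nodup_append hn) hmem (by simp)
      simp [pvInnerA, hmem, hno]
    · have hmem : e ∉ seen := by simp at he; exact he
      have hnd : (seen ++ [e]).Nodup := by
        simp [List.nodup_append, h]
        intro a ha hae
        exact hmem (hae ▸ ha)
      rw [pvInnerA]
      simp only [he]
      rw [if_neg (by simpa using hmem), ih (seen ++ [e]) hnd]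
      simp

theorem pvOuterA_eq (cs : List (List Int)) (seen : List Int) (h : seen.Nodup) :
    pvOuterA seen cs = if (seen ++ cs.flatMap (fun c => c)).Nodup then 1 else 0 := by
  induction cs generalizing seen with
  | nil => simp [pvOuterA, h]
  | cons c rest ih =>
    rw [pvOuterA, pvInnerA_eq c seen h]
    by_cases hc : (seen ++ c).Nodup
    · rw [if_pos hc]
      simp only []
      rw [ih (seen ++ c) hc]
      simp
    · rw [if_neg hc]
      have hno : ¬ (seen ++ (c :: rest).flatMap (fun c => c)).Nodup := by
        intro hn
        apply hc
        have hsub : List.Sublist (seen ++ c) (seen ++ (c :: rest).flatMap (fun c => c)) := by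
          simp only [List.flatMap_cons]
          exact List.Sublist.append_left (List.sublist_append_left c _) seen
        exact hn.sublist hsub
      rw [if_neg hno]

theorem ofList_sublist (xs : List Int) : List.Sublist (PySem.Set.ofList xs) xs := by
  induction xs using List.reverseRecOn with
  | nil => simp [PySem.Set.ofList_nil]
  | append_singleton ys y ih =>
    rw [PySem.Set.ofList_append_singleton, PySem.Set.add]
    by_cases hy : PySem.Set.contains (PySem.Set.ofList ys) y
    · rw [if_pos hy]
      exact ih.trans (List.sublist_append_left ys [y])
    · rw [if_neg hy]
      exact ih.append (List.Sublist.refl [y])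

theorem length_ofList_eq_iff (xs : List Int) :
    (PySem.Set.ofList xs).length = xs.length ↔ xs.Nodup := by
  constructor
  · intro h
    have := (ofList_sublist xs).eq_of_length h
    rw [← this]
    exact PySem.Set.nodup_ofList xs
  · intro h
    rw [PySem.Set.ofList_eq_self_of_nodup xs h]

-- ===== VERDICT (by name: the statement is the Claim_ definition above) =====
theorem cycles_disjoint_check_spec : Claim_equal_cycles_disjoint_check := by
  intro cs _
  unfold Spec_cycles_disjoint_check cycles_disjoint_check cycles_disjoint_check_alt
  rw [pvOuterA_eq cs [] List.nodup_nil]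
  simp only [List.nil_append]
  show (if ((cs.flatMap fun c => c)).Nodup then (1:Int) else 0)
      = (if (cs.flatMap fun c => c).length = (PySem.Set.ofList (cs.flatMap fun c => c)).length then (1:Int) else 0)
  by_cases h : (cs.flatMap fun c => c).Nodup
  · rw [if_pos h, if_pos ((length_ofList_eq_iff _).2 h).symm]
  · rw [if_neg h, if_neg (fun he => h ((length_ofList_eq_iff _).1 he.symm))]
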